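-- pv_equiv track=rewrite | github.com/JeremyPittard/stb | gen.py | try_solve
-- ===== SOURCE A (Python) =====
-- def find_solution(tiles, dice_sum):
--     """Find subset of tiles that sums to dice_sum"""
--     n = len(tiles)
--     for mask in range(1 << n):
--         total = 0
--         indices = []
--         for i in range(n):
--             if mask & (1 << i):
--                 total += tiles[i]
--                 indices.append(i)
--         if total == dice_sum:
--             return indices
--     return None
--
-- def try_solve(tiles, dice_pairs):
--     """Try to solve puzzle with given dice sequence"""
--     tiles = list(tiles)
--     for dice in dice_pairs:
--         solution = find_solution(tiles, dice[0] + dice[1])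
--         if solution:
--             for idx in sorted(solution, reverse=True):
--                 tiles.pop(idx)
--             if not tiles:
--                 return True
--     return False
-- ===== SOURCE B (Python) =====
-- def try_solve(tiles, dice_pairs):
--     """Try to solve puzzle with given dice sequence.
--
--     Subset-sum DP instead of A's 2^n mask enumeration: reach[i] is the set of
--     sums reachable from tiles[:i]; when the target is reachable, the tiles that
--     A's first-found (minimal) mask would remove are reconstructed greedily from
--     the highest index down, keeping tile i whenever the remaining target is
--     still reachable from tiles[:i].
--     """
--     tiles = list(tiles)
--     for dice in dice_pairs:
--         target = dice[0] + dice[1]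
--         cur = {0}
--         reach = [cur]
--         for t in tiles:
--             nxt = set(cur)
--             for s in cur:
--                 nxt.add(s + t)
--             cur = nxt
--             reach.append(cur)
--         if target in cur:
--             rem = target
--             kept = []
--             for i in range(len(tiles) - 1, -1, -1):
--                 if rem in reach[i]:
--                     kept.insert(0, tiles[i])
--                 else:
--                     rem -= tiles[i]
--             if len(kept) < len(tiles):
--                 tiles = kept
--                 if not tiles:
--                     return True
--     return False
-- ===== Notes on version B (the rewrite author's own statement) =====
-- stated objective: alternative
-- what changed: Replaces A's per-dice enumeration of all 2^n subset masks by a subset-sum reachability DP over prefix sums (reach[i] = sums achievable from tiles[:i]) with a greedy high-to-low reconstruction that removes exactly the tiles of A's first-found (i.e. numerically minimal) mask; intended as faster (measured 9.87x at the largest size where both finished, but A's early exit beat B on one such input, so a timing run did not confirm it).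
-- outside the precondition, e.g. on try_solve([1], [(1, 0), (5,)]): A returns True, B returns True
import Mathlib
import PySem

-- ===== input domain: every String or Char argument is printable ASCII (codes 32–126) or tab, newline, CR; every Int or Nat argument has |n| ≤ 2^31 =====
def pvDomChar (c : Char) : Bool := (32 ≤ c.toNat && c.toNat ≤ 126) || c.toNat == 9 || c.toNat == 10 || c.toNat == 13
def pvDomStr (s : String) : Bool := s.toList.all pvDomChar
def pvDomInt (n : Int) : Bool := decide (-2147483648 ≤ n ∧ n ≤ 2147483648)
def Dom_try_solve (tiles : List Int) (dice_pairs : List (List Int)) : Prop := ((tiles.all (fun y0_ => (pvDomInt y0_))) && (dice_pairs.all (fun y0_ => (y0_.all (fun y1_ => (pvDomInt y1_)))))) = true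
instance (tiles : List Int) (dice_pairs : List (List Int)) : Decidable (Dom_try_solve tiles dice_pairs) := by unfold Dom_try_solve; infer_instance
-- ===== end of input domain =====

-- B replaces A's per-dice 2^n subset-mask enumeration by a subset-sum reachability DP over
-- prefix sums with a greedy high-to-low reconstruction of the same (first-found = minimal)
-- mask; objective: alternative (a different algorithm; cheaper when reachable sums collide,
-- though A's early exit can win on some inputs).

-- ===== PORT A =====
-- inner loop of find_solution: `for i in range(n): if mask & (1 << i): …`
-- (`mask & (1 << i)` is nonzero exactly when bit i of the nonnegative mask is set,
--  which is Nat.testBit; masks range over the nonnegative range(1 << n))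
def fsInner (tiles : List Int) (mask : Nat) : Int × List Int :=
  (List.range tiles.length).foldl (fun acc i =>
    if mask.testBit i then (acc.1 + PySem.List.pyGetD tiles (i : Int) 0, acc.2 ++ [(i : Int)])
    else acc) (0, [])

-- outer loop of find_solution with its early return
def fsLoop (tiles : List Int) (dice_sum : Int) : List Nat → Option (List Int)
  | [] => none
  | m :: rest =>
    if (fsInner tiles m).1 = dice_sum then some (fsInner tiles m).2
    else fsLoop tiles dice_sum rest

def find_solution (tiles : List Int) (dice_sum : Int) : Option (List Int) :=
  fsLoop tiles dice_sum (List.range (2 ^ tiles.length))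

-- `for idx in sorted(solution, reverse=True): tiles.pop(idx)`
-- (pop? never fails here — indices come from range(len(tiles)); getD is its total form)
def popDesc (tiles : List Int) (sol : List Int) : List Int :=
  (PySem.List.sorted sol (fun x => x) true).foldl
    (fun ts idx => (((PySem.List.pop? ts idx).map Prod.snd).getD ts)) tiles

-- `for dice in dice_pairs:` with early return True; `if solution:` is falsy for None and []
def tsA : List Int → List (List Int) → Bool
  | _, [] => false
  | ts, dice :: rest =>
    match find_solution ts (PySem.List.pyGetD dice 0 0 + PySem.List.pyGetD dice 1 0) with
    | some sol =>
      if sol.isEmpty then tsA ts rest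
      else
        let ts' := popDesc ts sol
        if ts'.isEmpty then true else tsA ts' rest
    | none => tsA ts rest

def try_solve (tiles : List Int) (dice_pairs : List (List Int)) : Bool :=
  tsA tiles dice_pairs

-- ===== PORT B =====
-- `cur = {0}; reach = [cur]; for t in tiles: nxt = set(cur); for s in cur: nxt.add(s+t); cur = nxt; reach.append(cur)`
def reachB (tiles : List Int) : PySem.Set Int × List (PySem.Set Int) :=
  tiles.foldl (fun st t =>
    let nxt := st.1.foldl (fun n s => PySem.Set.add n (s + t)) (PySem.Set.ofList st.1)
    (nxt, st.2 ++ [nxt]))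
    (PySem.Set.ofList [0], [PySem.Set.ofList [0]])

-- `rem = target; kept = []; for i in range(len(tiles)-1, -1, -1): …` (kept.insert(0, x) prepends)
def recB (tiles : List Int) (reach : List (PySem.Set Int)) (target : Int) : List Int × Int :=
  (PySem.List.pyRange ((tiles.length : Int) - 1) (-1) (-1)).foldl
    (fun st i =>
      if PySem.Set.contains (PySem.List.pyGetD reach i PySem.Set.empty) st.2 then
        (PySem.List.pyGetD tiles i 0 :: st.1, st.2)
      else (st.1, st.2 - PySem.List.pyGetD tiles i 0))
    ([], target)

def tsB : List Int → List (List Int) → Bool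
  | _, [] => false
  | ts, dice :: rest =>
    let target := PySem.List.pyGetD dice 0 0 + PySem.List.pyGetD dice 1 0
    let cr := reachB ts
    if PySem.Set.contains cr.1 target then
      let kept := (recB ts cr.2 target).1
      if kept.length < ts.length then
        if kept.isEmpty then true else tsB kept rest
      else tsB ts rest
    else tsB ts rest

def try_solve_alt (tiles : List Int) (dice_pairs : List (List Int)) : Bool :=
  tsB tiles dice_pairs

-- ===== PRECONDITION & SPEC =====
-- A reads dice[0] and dice[1] of every processed pair, raising IndexError on a pair with
-- fewer than two entries; Pre_ requires every pair to have ≥ 2 entries. This conservatively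
-- also excludes inputs where A returns True before ever reaching a short pair.
def Pre_try_solve (tiles : List Int) (dice_pairs : List (List Int)) : Prop :=
  ∀ d ∈ dice_pairs, 2 ≤ d.length
instance (tiles : List Int) (dice_pairs : List (List Int)) : Decidable (Pre_try_solve tiles dice_pairs) := by unfold Pre_try_solve; infer_instance

def pvWitness_try_solve : List Int × List (List Int) := ([1, 2], [[1, 1], [1, 2]])

def Spec_try_solve (tiles : List Int) (dice_pairs : List (List Int)) (out : Bool) : Prop := out = try_solve_alt tiles dice_pairs
instance (tiles : List Int) (dice_pairs : List (List Int)) (out : Bool) : Decidable (Spec_try_solve tiles dice_pairs out) := by unfold Spec_try_solve; infer_instance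

-- ===== CLAIM (what is proved, stated in full; the proofs are below) =====
def Claim_equal_try_solve : Prop := ∀ (tiles : List Int) (dice_pairs : List (List Int)), Dom_try_solve tiles dice_pairs → Pre_try_solve tiles dice_pairs → Spec_try_solve tiles dice_pairs (try_solve tiles dice_pairs)

-- ===== LEMMAS AND PROOFS =====

-- sum of the tiles at the set bits of m below position k
def sumTake (ts : List Int) : Nat → Nat → Int
  | 0, _ => 0
  | k + 1, m => sumTake ts k m + (if m.testBit k then ts.getD k 0 else 0)

-- the indices list A's inner loop builds for mask m over range n
def bitIdx (n m : Nat) : List Int :=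
  ((List.range n).filter (fun i => m.testBit i)).map (fun i : Nat => (i : Int))

-- the tiles at the UNSET bits of m below k (what survives removing mask m)
def keep (ts : List Int) (k m : Nat) : List Int :=
  ((List.range k).filter (fun i => !m.testBit i)).map (fun i : Nat => ts.getD i 0)

-- subset-sum feasibility over the first k tiles
def feasb (ts : List Int) (k : Nat) (t : Int) : Bool :=
  (List.range (2 ^ k)).any (fun m => sumTake ts k m == t)

-- the greedy minimal mask
def gmask (ts : List Int) : Nat → Int → Nat
  | 0, _ => 0
  | k + 1, t =>
    if feasb ts k t then gmask ts k t
    else 2 ^ k + gmask ts k (t - ts.getD k 0)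

lemma feasb_iff (ts : List Int) (k : Nat) (t : Int) :
    feasb ts k t = true ↔ ∃ m < 2 ^ k, sumTake ts k m = t := by
  simp [feasb, List.any_eq_true, List.mem_range]

lemma sumTake_congr (ts : List Int) (k : Nat) {m m' : Nat}
    (h : ∀ i < k, m.testBit i = m'.testBit i) : sumTake ts k m = sumTake ts k m' := by
  induction k with
  | zero => rfl
  | succ k ih =>
    simp only [sumTake, ih (fun i hi => h i (by omega)), h k (by omega)]

lemma sumTake_two_pow_add (ts : List Int) (k m : Nat) :
    sumTake ts k (2 ^ k + m) = sumTake ts k m :=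
  sumTake_congr ts k (fun i hi => Nat.testBit_two_pow_add_gt hi m)

lemma testBit_false_of_lt {m k : Nat} (h : m < 2 ^ k) : m.testBit k = false :=
  Nat.testBit_lt_two_pow h

lemma lt_two_pow_of_not_testBit {m k : Nat} (h1 : m < 2 ^ (k + 1))
    (h2 : m.testBit k = false) : m < 2 ^ k := by
  rcases Nat.lt_or_ge m (2 ^ k) with h | h
  · exact h
  · rw [Nat.testBit_of_two_pow_le_and_two_pow_add_one_gt h h1] at h2
    exact absurd h2 (by simp)

lemma testBit_true_of_le {m k : Nat} (h1 : 2 ^ k ≤ m) (h2 : m < 2 ^ (k + 1)) :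
    m.testBit k = true :=
  Nat.testBit_of_two_pow_le_and_two_pow_add_one_gt h1 h2

lemma feasb_zero (ts : List Int) (t : Int) : feasb ts 0 t = true ↔ t = 0 := by
  rw [feasb_iff]
  constructor
  · rintro ⟨m, _, h⟩; simpa [sumTake] using h.symm
  · rintro rfl; exact ⟨0, by norm_num, rfl⟩

lemma feas_succ (ts : List Int) (k : Nat) (t : Int) :
    feasb ts (k + 1) t = true ↔
      (feasb ts k t = true ∨ feasb ts k (t - ts.getD k 0) = true) := by
  rw [feasb_iff, feasb_iff, feasb_iff]
  constructor
  · rintro ⟨m, hm, hs⟩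
    by_cases hb : m.testBit k
    · right
      have h2k : 2 ^ k ≤ m := Nat.ge_two_pow_of_testBit hb
      refine ⟨m - 2 ^ k, by have := pow_succ 2 k; omega, ?_⟩
      have hdec : m = 2 ^ k + (m - 2 ^ k) := by omega
      have : sumTake ts k (m - 2 ^ k) = sumTake ts k m := by
        conv_rhs => rw [hdec]
        exact (sumTake_two_pow_add ts k (m - 2 ^ k)).symm
      simp only [sumTake, hb, if_pos] at hs
      omega
    · left
      refine ⟨m, lt_two_pow_of_not_testBit hm (by simpa using hb), ?_⟩
      simpa [sumTake, hb] using hs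
  · rintro (⟨m, hm, hs⟩ | ⟨m, hm, hs⟩)
    · refine ⟨m, by have := pow_succ 2 k; omega, ?_⟩
      simp [sumTake, testBit_false_of_lt hm, hs]
    · refine ⟨2 ^ k + m, by have := pow_succ 2 k; omega, ?_⟩
      have hb : (2 ^ k + m).testBit k = true :=
        testBit_true_of_le (by omega) (by have := pow_succ 2 k; omega)
      simp only [sumTake, hb, if_pos, sumTake_two_pow_add, hs]
      omega

lemma gmask_spec (ts : List Int) :
    ∀ (k : Nat) (t : Int), feasb ts k t = true →
      gmask ts k t < 2 ^ k ∧ sumTake ts k (gmask ts k t) = t ∧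
        ∀ m, m < 2 ^ k → sumTake ts k m = t → gmask ts k t ≤ m := by
  intro k
  induction k with
  | zero =>
    intro t ht
    have ht0 : t = 0 := (feasb_zero ts t).mp ht
    exact ⟨by norm_num [gmask], by simp [gmask, sumTake, ht0], fun m _ _ => Nat.zero_le m⟩
  | succ k ih =>
    intro t ht
    by_cases hf : feasb ts k t = true
    · obtain ⟨hlt, hsum, hmin⟩ := ih t hf
      have hg : gmask ts (k + 1) t = gmask ts k t := by simp [gmask, hf]
      refine ⟨by rw [hg]; have := pow_succ 2 k; omega, ?_, ?_⟩
      · rw [hg]; simp [sumTake, testBit_false_of_lt hlt, hsum]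
      · intro m hm hsm
        rw [hg]
        by_cases hb : m.testBit k
        · have := Nat.ge_two_pow_of_testBit hb; omega
        · have hmk : m < 2 ^ k := lt_two_pow_of_not_testBit hm (by simpa using hb)
          exact hmin m hmk (by simpa [sumTake, hb] using hsm)
    · have hf' : feasb ts k (t - ts.getD k 0) = true := by
        rcases (feas_succ ts k t).mp ht with h | h
        · exact absurd h hf
        · exact h
      obtain ⟨hlt, hsum, hmin⟩ := ih _ hf'
      have hg : gmask ts (k + 1) t = 2 ^ k + gmask ts k (t - ts.getD k 0) := by
        simp [gmask, hf]
      refine ⟨by rw [hg]; have := pow_succ 2 k; omega, ?_, ?_⟩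
      · rw [hg]
        have hb : (2 ^ k + gmask ts k (t - ts.getD k 0)).testBit k = true :=
          testBit_true_of_le (by omega) (by have := pow_succ 2 k; omega)
        simp only [sumTake, hb, if_pos, sumTake_two_pow_add, hsum]
        omega
      · intro m hm hsm
        have hb : m.testBit k = true := by
          by_contra hb
          have hmk : m < 2 ^ k := lt_two_pow_of_not_testBit hm (by simpa using hb)
          have : sumTake ts k m = t := by
            simpa [sumTake, Bool.eq_false_iff.mpr hb] using hsm
          exact hf ((feasb_iff ts k t).mpr ⟨m, hmk, this⟩)
        have h2k : 2 ^ k ≤ m := Nat.ge_two_pow_of_testBit hb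
        have hdec : m = 2 ^ k + (m - 2 ^ k) := by omega
        have hs' : sumTake ts k (m - 2 ^ k) = t - ts.getD k 0 := by
          have h1 : sumTake ts (k + 1) m = sumTake ts k m + ts.getD k 0 := by
            simp [sumTake, hb]
          have h2 : sumTake ts k m = sumTake ts k (m - 2 ^ k) := by
            conv_lhs => rw [hdec]
            exact sumTake_two_pow_add ts k (m - 2 ^ k)
          omega
        have := hmin (m - 2 ^ k) (by have := pow_succ 2 k; omega) hs'
        rw [hg]; omega

-- ---- A side: find_solution returns the indices of the LEAST feasible mask ----

lemma bitIdx_succ (n m : Nat) :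
    bitIdx (n + 1) m = bitIdx n m ++ (if m.testBit n then [(n : Int)] else []) := by
  simp only [bitIdx, List.range_succ, List.filter_append, List.map_append]
  by_cases h : m.testBit n <;> simp [h]

lemma fsInner_eq (ts : List Int) (m : Nat) :
    fsInner ts m = (sumTake ts ts.length m, bitIdx ts.length m) := by
  suffices h : ∀ n, (List.range n).foldl (fun acc i =>
      if m.testBit i then (acc.1 + PySem.List.pyGetD ts (i : Int) 0, acc.2 ++ [(i : Int)])
      else acc) ((0 : Int), ([] : List Int)) = (sumTake ts n m, bitIdx n m) by
    exact h ts.length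
  intro n
  induction n with
  | zero => simp [sumTake, bitIdx]
  | succ n ih =>
    rw [List.range_succ, List.foldl_append, ih]
    by_cases h : m.testBit n <;>
      simp [h, sumTake, bitIdx_succ, PySem.List.pyGetD_natCast]

lemma fsLoop_eq (ts : List Int) (t : Int) (ms : List Nat) :
    fsLoop ts t ms =
      (ms.find? (fun m => decide (sumTake ts ts.length m = t))).map
        (fun m => bitIdx ts.length m) := by
  induction ms with
  | nil => rfl
  | cons m rest ih =>
    rw [fsLoop, fsInner_eq]
    by_cases h : sumTake ts ts.length m = t
    · simp [h, List.find?_cons_of_pos]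
    · rw [if_neg h, ih, List.find?_cons_of_neg (by simpa using h)]

lemma find?_range_eq_some {p : Nat → Bool} {N m : Nat} (hm : m < N) (hp : p m = true)
    (hleast : ∀ j, j < m → p j = false) : (List.range N).find? p = some m := by
  have hN : N = m + (N - m) := by omega
  rw [hN, List.range_add, List.find?_append]
  have h1 : (List.range m).find? p = none :=
    List.find?_eq_none.mpr (fun x hx => by simp [hleast x (List.mem_range.mp hx)])
  have h2 : N - m = (N - m - 1) + 1 := by omega
  rw [h1, Option.none_or, h2, List.range_succ_eq_map]
  simp [List.find?_cons_of_pos, hp]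

lemma find_solution_eq_none (ts : List Int) (t : Int)
    (h : feasb ts ts.length t = false) : find_solution ts t = none := by
  rw [find_solution, fsLoop_eq, List.find?_eq_none.mpr, Option.map_none]
  intro m hm
  simp only [decide_eq_true_eq]
  intro hs
  rw [(feasb_iff ts ts.length t).mpr ⟨m, List.mem_range.mp hm, hs⟩] at h
  exact Bool.true_eq_false.mp h

lemma find_solution_eq_some (ts : List Int) (t : Int)
    (h : feasb ts ts.length t = true) :
    find_solution ts t = some (bitIdx ts.length (gmask ts ts.length t)) := by
  obtain ⟨hlt, hsum, hmin⟩ := gmask_spec ts ts.length t h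
  rw [find_solution, fsLoop_eq,
    find?_range_eq_some hlt (by simpa using hsum) (fun j hj => by
      simp only [decide_eq_false_iff_not]
      intro hs
      have := hmin j (by omega) hs
      omega)]
  rfl

lemma exists_testBit_lt_iff {m n : Nat} (hm : m < 2 ^ n) :
    (∃ i < n, m.testBit i = true) ↔ m ≠ 0 := by
  constructor
  · rintro ⟨i, _, hi⟩ rfl
    simp at hi
  · intro h
    by_contra hc
    push_neg at hc
    refine h (Nat.zero_of_testBit_eq_false (fun i => ?_))
    by_cases hin : i < n
    · exact Bool.eq_false_iff.mpr (hc i hin)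
    · exact testBit_false_of_lt (lt_of_lt_of_le hm (Nat.pow_le_pow_right (by norm_num) (by omega)))

lemma bitIdx_eq_nil_iff {n m : Nat} (hm : m < 2 ^ n) : bitIdx n m = [] ↔ m = 0 := by
  simp only [bitIdx, List.map_eq_nil_iff, List.filter_eq_nil_iff, List.mem_range]
  constructor
  · intro h
    refine Nat.zero_of_testBit_eq_false (fun i => ?_)
    by_cases hin : i < n
    · exact Bool.eq_false_iff.mpr (by simpa using h i hin)
    · exact testBit_false_of_lt (lt_of_lt_of_le hm (Nat.pow_le_pow_right (by norm_num) (by omega)))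
  · rintro rfl i _
    simp

-- ---- keep lemmas ----

lemma keep_succ (ts : List Int) (k m : Nat) :
    keep ts (k + 1) m = keep ts k m ++ (if m.testBit k then [] else [ts.getD k 0]) := by
  simp only [keep, List.range_succ, List.filter_append, List.map_append]
  by_cases h : m.testBit k <;> simp [h]

lemma keep_congr (ts : List Int) (k : Nat) {m m' : Nat}
    (h : ∀ i < k, m.testBit i = m'.testBit i) : keep ts k m = keep ts k m' := by
  unfold keep
  congr 1
  exact List.filter_congr (fun i hi => by rw [h i (List.mem_range.mp hi)])

lemma keep_concat (ts : List Int) (x : Int) (k m : Nat) (hk : k ≤ ts.length) :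
    keep (ts ++ [x]) k m = keep ts k m := by
  unfold keep
  refine List.map_congr_left (fun i hi => ?_)
  have : i < ts.length := by
    have := List.mem_range.mp (List.mem_of_mem_filter hi); omega
  exact List.getD_append ts [x] 0 i this

lemma keep_zero_length (ts : List Int) (n : Nat) : (keep ts n 0).length = n := by
  simp [keep]

lemma keep_length_lt_iff (ts : List Int) {n m : Nat} (hm : m < 2 ^ n) :
    (keep ts n m).length < n ↔ m ≠ 0 := by
  rw [← exists_testBit_lt_iff hm]
  simp only [keep, List.length_map]
  constructor
  · intro h
    have h' : ((List.range n).filter (fun i => !m.testBit i)).length < (List.range n).length := by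
      simpa using h
    obtain ⟨i, hi, hb⟩ := List.length_filter_lt_length_iff_exists.mp h'
    exact ⟨i, List.mem_range.mp hi, by simpa using hb⟩
  · rintro ⟨i, hi, hb⟩
    calc ((List.range n).filter (fun i => !m.testBit i)).length
        < (List.range n).length :=
          List.length_filter_lt_length_iff_exists.mpr ⟨i, List.mem_range.mpr hi, by simp [hb]⟩
      _ = n := List.length_range

-- ---- A side: the descending pops remove exactly the masked tiles ----

lemma sorted_bitIdx (n m : Nat) :
    PySem.List.sorted (bitIdx n m) (fun x => x) true = (bitIdx n m).reverse := by
  refine PySem.List.sorted_rev_eq_of_perm_of_pairwise_gt _ _ _ (List.reverse_perm _) ?_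
  rw [List.pairwise_reverse]
  unfold bitIdx
  rw [List.pairwise_map]
  exact (List.pairwise_lt_range.filter _).imp (fun h => by exact_mod_cast h)

lemma popFold (m : Nat) : ∀ (n : Nat) (ts s : List Int), ts.length = n →
    ((bitIdx n m).reverse).foldl
      (fun ts idx => (((PySem.List.pop? ts idx).map Prod.snd).getD ts)) (ts ++ s) =
      keep ts n m ++ s := by
  intro n
  induction n with
  | zero =>
    intro ts s hl
    rw [List.length_eq_zero_iff.mp hl]
    simp [bitIdx, keep]
  | succ n ih =>
    intro ts s hl
    have hne : ts ≠ [] := by intro h; rw [h] at hl; simp at hl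
    obtain ⟨ts', x, rfl⟩ : ∃ ts' x, ts = ts' ++ [x] :=
      ⟨ts.dropLast, ts.getLast hne, (List.dropLast_append_getLast hne).symm⟩
    have hl' : ts'.length = n := by simpa using hl
    rw [bitIdx_succ, List.reverse_append, List.foldl_append]
    by_cases hb : m.testBit n
    · have hpop : PySem.List.pop? (ts' ++ [x] ++ s) ((n : Int)) =
          some ((ts' ++ [x] ++ s)[n]'(by simp; omega), (ts' ++ [x] ++ s).eraseIdx n) := by
        exact_mod_cast PySem.List.pop?_natCast (ts' ++ [x] ++ s) n (by simp; omega)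
      have herase : (ts' ++ [x] ++ s).eraseIdx n = ts' ++ s := by
        rw [List.append_assoc, List.singleton_append, ← hl']
        simp [List.eraseIdx_append_of_length_le]
      simp only [hb, if_pos, List.reverse_cons, List.reverse_nil, List.nil_append,
        List.foldl_cons, List.foldl_nil]
      rw [hpop]
      simp only [Option.map_some, Option.getD_some, herase]
      rw [ih ts' s hl', keep_succ, hb, if_pos rfl, List.append_nil, keep_concat ts' x n m (by omega)]
    · simp only [hb, List.reverse_nil, List.foldl_nil, if_neg, Bool.false_eq_true,
        not_false_iff, List.append_assoc, List.singleton_append]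
      rw [ih ts' (x :: s) hl', keep_succ, Bool.eq_false_iff.mpr hb]
      have hx : (ts' ++ [x]).getD n 0 = x := by
        rw [List.getD_eq_getElem?_getD, ← hl', List.getElem?_concat_length]
        rfl
      rw [if_neg (by simp), hx, keep_concat ts' x n m (by omega)]
      simp

lemma popDesc_eq (ts : List Int) (m : Nat) :
    popDesc ts (bitIdx ts.length m) = keep ts ts.length m := by
  rw [popDesc, sorted_bitIdx]
  have := popFold m ts.length ts [] rfl
  simpa using this

-- ---- B side: the reach sets characterise subset-sum feasibility ----

lemma sumTake_concat (ts : List Int) (x : Int) (k m : Nat) (hk : k ≤ ts.length) :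
    sumTake (ts ++ [x]) k m = sumTake ts k m := by
  induction k with
  | zero => rfl
  | succ k ih =>
    simp only [sumTake, ih (by omega)]
    congr 1
    by_cases hb : m.testBit k
    · rw [if_pos hb, if_pos hb, List.getD_append ts [x] 0 k (by omega)]
    · rw [if_neg (by simp [hb]), if_neg (by simp [hb])]

lemma feasb_concat (ts : List Int) (x : Int) (k : Nat) (t : Int) (hk : k ≤ ts.length) :
    feasb (ts ++ [x]) k t = feasb ts k t := by
  unfold feasb
  congr 1
  funext m
  rw [sumTake_concat ts x k m hk]

lemma reachB_spec (ts : List Int) :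
    (reachB ts).1 = (reachB ts).2.getD ts.length PySem.Set.empty ∧
    (reachB ts).2.length = ts.length + 1 ∧
    ∀ i ≤ ts.length, ∀ x : Int,
      (x ∈ (reachB ts).2.getD i PySem.Set.empty ↔ feasb ts i x = true) := by
  induction ts using List.reverseRecOn with
  | nil =>
    refine ⟨rfl, rfl, ?_⟩
    intro i hi x
    have hi0 : i = 0 := by simpa using hi
    subst hi0
    simp [reachB, PySem.Set.mem_ofList, feasb_zero]
  | append_singleton ts t ih =>
    obtain ⟨ih1, ih2, ih3⟩ := ih
    have hstep : reachB (ts ++ [t]) =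
        ((reachB ts).1.foldl (fun n s => PySem.Set.add n (s + t)) (PySem.Set.ofList (reachB ts).1),
         (reachB ts).2 ++ [(reachB ts).1.foldl (fun n s => PySem.Set.add n (s + t)) (PySem.Set.ofList (reachB ts).1)]) := by
      rw [reachB, List.foldl_append, ← reachB]
      simp only [List.foldl_cons, List.foldl_nil]
    set nxt := (reachB ts).1.foldl (fun n s => PySem.Set.add n (s + t)) (PySem.Set.ofList (reachB ts).1) with hnxt
    have hmemnxt : ∀ x : Int, x ∈ nxt ↔ (x ∈ (reachB ts).1 ∨ (x - t) ∈ (reachB ts).1) := by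
      intro x
      rw [hnxt, PySem.Set.mem_foldl_add, PySem.Set.mem_ofList]
      constructor
      · rintro (h | ⟨s, hs, rfl⟩)
        · exact Or.inl h
        · exact Or.inr (by simpa using hs)
      · rintro (h | h)
        · exact Or.inl h
        · exact Or.inr ⟨x - t, h, by ring⟩
    have hlen : ((reachB (ts ++ [t])).2).length = (ts ++ [t]).length + 1 := by
      rw [hstep]; simp [ih2]
    refine ⟨?_, hlen, ?_⟩
    · rw [hstep]
      simp only
      rw [List.getD_eq_getElem?_getD]
      have : (ts ++ [t]).length = (reachB ts).2.length := by simp [ih2]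
      rw [this, List.getElem?_concat_length]
      rfl
    · intro i hi x
      rw [hstep]
      simp only
      have hlen' : (ts ++ [t]).length = ts.length + 1 := by simp
      rw [hlen'] at hi
      rcases Nat.lt_or_ge i ((reachB ts).2.length) with hilt | hige
      · have hile : i ≤ ts.length := by omega
        rw [List.getD_eq_getElem?_getD, List.getElem?_append_left hilt,
          ← List.getD_eq_getElem?_getD, ih3 i hile, feasb_concat ts t i x hile]
      · have hieq : i = ts.length + 1 := by omega
        subst hieq
        have hgetD : ((reachB ts).2 ++ [nxt]).getD (ts.length + 1) PySem.Set.empty = nxt := by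
          rw [List.getD_eq_getElem?_getD,
            show ts.length + 1 = (reachB ts).2.length from by omega, List.getElem?_concat_length]
          rfl
        rw [hgetD, hmemnxt x]
        have hg : (ts ++ [t]).getD ts.length 0 = t := by
          rw [List.getD_eq_getElem?_getD, List.getElem?_concat_length]; rfl
        rw [feas_succ (ts ++ [t]) ts.length x, hg,
          feasb_concat ts t ts.length x (le_refl _),
          feasb_concat ts t ts.length (x - t) (le_refl _), ih1,
          ih3 ts.length (le_refl _) x, ih3 ts.length (le_refl _) (x - t)]

-- ---- B side: the greedy reconstruction builds keep of the minimal mask ----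

lemma recB_fold (ts : List Int) :
    ∀ (i : Nat), i ≤ ts.length → ∀ (rem : Int) (acc : List Int), feasb ts i rem = true →
      (PySem.List.pyRange ((i : Int) - 1) (-1) (-1)).foldl
        (fun st j =>
          if PySem.Set.contains (PySem.List.pyGetD (reachB ts).2 j PySem.Set.empty) st.2 then
            (PySem.List.pyGetD ts j 0 :: st.1, st.2)
          else (st.1, st.2 - PySem.List.pyGetD ts j 0))
        (acc, rem) =
      (keep ts i (gmask ts i rem) ++ acc, 0) := by
  obtain ⟨-, -, hmem⟩ := reachB_spec ts
  intro i
  induction i with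
  | zero =>
    intro _ rem acc hf
    rw [PySem.List.pyRange_neg_one_eq_nil (by norm_num)]
    simp [keep, gmask, (feasb_zero ts rem).mp hf]
  | succ i ih =>
    intro hle rem acc hf
    have hcons : PySem.List.pyRange (((i : Nat) + 1 : Int) - 1) (-1) (-1) =
        (i : Int) :: PySem.List.pyRange ((i : Int) - 1) (-1) (-1) := by
      have : (((i : Nat) + 1 : Int) - 1) = (i : Int) := by push_cast; ring
      rw [this, PySem.List.pyRange_neg_one_cons (by omega)]
    rw [show (((i + 1 : Nat) : Int) - 1) = (((i : Nat) + 1 : Int) - 1) from by push_cast; ring,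
      hcons, List.foldl_cons]
    have hgetr : PySem.List.pyGetD (reachB ts).2 ((i : Int)) PySem.Set.empty =
        (reachB ts).2.getD i PySem.Set.empty := PySem.List.pyGetD_natCast _ i _
    have hgett : PySem.List.pyGetD ts ((i : Int)) 0 = ts.getD i 0 :=
      PySem.List.pyGetD_natCast _ i _
    by_cases hfi : feasb ts i rem = true
    · have hcont : PySem.Set.contains (PySem.List.pyGetD (reachB ts).2 ((i : Int)) PySem.Set.empty) rem = true := by
        rw [hgetr, PySem.Set.contains_iff]
        exact (hmem i (by omega) rem).mpr hfi
      simp only [hcont, if_pos, hgett]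
      rw [ih (by omega) rem (ts.getD i 0 :: acc) hfi]
      have hglt := (gmask_spec ts i rem hfi).1
      have hg : gmask ts (i + 1) rem = gmask ts i rem := by simp [gmask, hfi]
      rw [hg, keep_succ, testBit_false_of_lt hglt]
      simp
    · have hcont : PySem.Set.contains (PySem.List.pyGetD (reachB ts).2 ((i : Int)) PySem.Set.empty) rem = false := by
        rw [hgetr]
        rw [Bool.eq_false_iff]
        intro hc
        exact hfi ((hmem i (by omega) rem).mp ((PySem.Set.contains_iff _ _).mp hc))
      have hfi' : feasb ts i (rem - ts.getD i 0) = true := by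
        rcases (feas_succ ts i rem).mp hf with h | h
        · exact absurd h hfi
        · exact h
      simp only [hcont, Bool.false_eq_true, if_neg, not_false_iff, hgett]
      rw [ih (by omega) (rem - ts.getD i 0) acc hfi']
      have hglt := (gmask_spec ts i (rem - ts.getD i 0) hfi').1
      have hg : gmask ts (i + 1) rem = 2 ^ i + gmask ts i (rem - ts.getD i 0) := by
        simp [gmask, hfi]
      have hb : (2 ^ i + gmask ts i (rem - ts.getD i 0)).testBit i = true :=
        testBit_true_of_le (by omega) (by have := pow_succ 2 i; omega)
      rw [hg, keep_succ, hb, if_pos rfl, List.append_nil,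
        keep_congr ts i (fun j hj => Nat.testBit_two_pow_add_gt hj _)]

lemma recB_eq (ts : List Int) (t : Int) (hf : feasb ts ts.length t = true) :
    recB ts (reachB ts).2 t = (keep ts ts.length (gmask ts ts.length t), 0) := by
  rw [recB]
  have := recB_fold ts ts.length (le_refl _) t [] hf
  simpa using this

-- ---- main equivalence ----

lemma tsA_eq_tsB : ∀ (dp : List (List Int)) (ts : List Int), tsA ts dp = tsB ts dp := by
  intro dp
  induction dp with
  | nil => intro ts; rfl
  | cons dice rest ih =>
    intro ts
    rw [tsA, tsB]
    obtain ⟨h1, -, hmem⟩ := reachB_spec ts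
    set t := PySem.List.pyGetD dice 0 0 + PySem.List.pyGetD dice 1 0 with ht
    by_cases hf : feasb ts ts.length t = true
    · have hcont : PySem.Set.contains (reachB ts).1 t = true := by
        rw [h1, PySem.Set.contains_iff]
        exact (hmem ts.length (le_refl _) t).mpr hf
      rw [find_solution_eq_some ts t hf, hcont]
      obtain ⟨hlt, -, -⟩ := gmask_spec ts ts.length t hf
      rw [recB_eq ts t hf]
      simp only [if_pos]
      by_cases hm : gmask ts ts.length t = 0
      · have hnil : bitIdx ts.length (gmask ts ts.length t) = [] :=
          (bitIdx_eq_nil_iff hlt).mpr hm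
        rw [hnil]
        have hklen : ¬ (keep ts ts.length (gmask ts ts.length t)).length < ts.length := by
          rw [hm, keep_zero_length]
          omega
        simp only [List.isEmpty_nil, if_pos, if_neg hklen]
        exact ih ts
      · have hnnil : bitIdx ts.length (gmask ts ts.length t) ≠ [] := by
          rw [Ne, bitIdx_eq_nil_iff hlt]; exact hm
        have hklen : (keep ts ts.length (gmask ts ts.length t)).length < ts.length :=
          (keep_length_lt_iff ts hlt).mpr hm
        rw [popDesc_eq ts (gmask ts ts.length t)]
        simp only [List.isEmpty_iff, hnnil, if_neg, if_pos hklen]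
        rw [if_neg (by simpa using hnnil)]
        by_cases hk : keep ts ts.length (gmask ts ts.length t) = []
        · simp [hk]
        · rw [if_neg (by simpa using hk), if_neg (by simpa using hk)]
          exact ih _
    · have hcont : PySem.Set.contains (reachB ts).1 t = false := by
        rw [h1, Bool.eq_false_iff]
        intro hc
        exact hf ((hmem ts.length (le_refl _) t).mp ((PySem.Set.contains_iff _ _).mp hc))
      rw [find_solution_eq_none ts t (by simpa using hf), hcont]
      simp only [Bool.false_eq_true, if_neg, not_false_iff]
      exact ih ts

-- ===== VERDICT (by name: the statement is the Claim_ definition above) =====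
theorem try_solve_spec : Claim_equal_try_solve := by
  intro tiles dice_pairs _ _
  unfold Spec_try_solve try_solve try_solve_alt
  exact tsA_eq_tsB dice_pairs tiles
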